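-- pv_equiv track=rewrite | github.com/matthewod11-stack/jd-fit-evaluator | src/scoring/features.py | _split_level_tokens
-- ===== SOURCE A (Python) =====
-- _LEVEL_RANK = {
--     "intern": 0,
--     "junior": 1,
--     "associate": 1,
--     "mid": 2,
--     "senior": 3,
--     "lead": 4,
--     "staff": 4,
--     "principal": 5,
-- }
--
-- def _split_level_tokens(tokens: list[str]) -> tuple[list[str], int | None]:
--     """Separate level-bearing tokens and return remaining tokens plus highest level."""
--     core: list[str] = []
--     level: int | None = None
--     for token in tokens:
--         rank = _LEVEL_RANK.get(token)
--         if rank is None: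
--             core.append(token)
--             continue
--         if level is None or rank > level:
--             level = rank
--     return core, level
-- ===== SOURCE B (Python) =====
-- _LEVEL_RANK = {
--     "intern": 0,
--     "junior": 1,
--     "associate": 1,
--     "mid": 2,
--     "senior": 3,
--     "lead": 4,
--     "staff": 4,
--     "principal": 5,
-- }
--
-- def _split_level_tokens(tokens: list[str]) -> tuple[list[str], int | None]:
--     """Separate level-bearing tokens and return remaining tokens plus highest level."""
--     present = set(tokens)
--     level = max((rank for name, rank in _LEVEL_RANK.items() if name in present),
--                 default=None)
--     core = [t for t in tokens if t not in _LEVEL_RANK]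
--     return core, level
-- ===== Notes on version B (the rewrite author's own statement) =====
-- stated objective: alternative
-- what changed: Instead of A's single loop over the tokens threading a core accumulator and a running max, B indexes the tokens once into a set and scans the constant rank table against that set to pick the highest present rank (correct since max ignores order and duplicates), with core obtained by a separate filter.
import Mathlib
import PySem

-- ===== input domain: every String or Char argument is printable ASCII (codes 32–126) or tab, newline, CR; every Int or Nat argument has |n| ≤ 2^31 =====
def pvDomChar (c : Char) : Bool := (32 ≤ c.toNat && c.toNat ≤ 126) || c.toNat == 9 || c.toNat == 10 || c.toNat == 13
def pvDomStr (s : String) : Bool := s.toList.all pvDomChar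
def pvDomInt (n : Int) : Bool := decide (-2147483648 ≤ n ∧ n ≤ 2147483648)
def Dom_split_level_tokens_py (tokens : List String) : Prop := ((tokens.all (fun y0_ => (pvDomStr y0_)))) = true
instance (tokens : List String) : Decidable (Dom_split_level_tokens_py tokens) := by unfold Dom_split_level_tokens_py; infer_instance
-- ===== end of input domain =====

-- B replaces A's single token loop carrying (core, running max) by indexing the tokens
-- into a set once and scanning the constant rank table against it for the highest
-- present rank (max is order/duplicate-insensitive), plus a filter for core; objective: alternative.

-- ===== PORT A =====
def pvLevelRank : PySem.Dict String Int :=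
  PySem.Dict.ofList
    [("intern", 0), ("junior", 1), ("associate", 1), ("mid", 2),
     ("senior", 3), ("lead", 4), ("staff", 4), ("principal", 5)]

/-- Port of A: one fold over the tokens carrying (core, level), branches in A's order. -/
def split_level_tokens_py (tokens : List String) : List String × Option Int :=
  tokens.foldl
    (fun (st : List String × Option Int) token =>
      match PySem.Dict.get? pvLevelRank token with
      | none => (st.1 ++ [token], st.2)
      | some rank =>
        match st.2 with
        | none => (st.1, some rank)
        | some lvl => if rank > lvl then (st.1, some rank) else (st.1, some lvl))
    ([], none)

-- ===== PORT B =====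
/-- Port of B: set(tokens) once, then max (= List.max?) over the rank-table entries
    whose key is in that set; core by a separate filter. -/
def split_level_tokens_py_alt (tokens : List String) : List String × Option Int :=
  let present := PySem.Set.ofList tokens
  let level :=
    (pvLevelRank.items.filterMap
      (fun p => if PySem.Set.contains present p.1 then some p.2 else none)).max?
  let core := tokens.filter (fun t => !(pvLevelRank.contains t))
  (core, level)

-- ===== PRECONDITION & SPEC =====
def Spec_split_level_tokens_py (tokens : List String) (out : List String × Option Int) : Prop := out = split_level_tokens_py_alt tokens
instance (tokens : List String) (out : List String × Option Int) : Decidable (Spec_split_level_tokens_py tokens out) := by unfold Spec_split_level_tokens_py; infer_instance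

-- ===== CLAIM (what is proved, stated in full; the proofs are below) =====
def Claim_equal_split_level_tokens_py : Prop := ∀ (tokens : List String), Dom_split_level_tokens_py tokens → Spec_split_level_tokens_py tokens (split_level_tokens_py tokens)

-- ===== LEMMAS AND PROOFS =====

/-- A's running-max fold from any state equals appending the non-level tokens to core and
    folding `max` over the ranks of the level tokens onto the incoming level. -/
lemma splitFold_eq (tokens : List String) : ∀ (core : List String) (lvl : Option Int),
    tokens.foldl
      (fun (st : List String × Option Int) token =>
        match PySem.Dict.get? pvLevelRank token with
        | none => (st.1 ++ [token], st.2)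
        | some rank =>
          match st.2 with
          | none => (st.1, some rank)
          | some l => if rank > l then (st.1, some rank) else (st.1, some l))
      (core, lvl)
    = (core ++ tokens.filter (fun t => (PySem.Dict.get? pvLevelRank t).isNone),
       (tokens.filterMap (fun t => PySem.Dict.get? pvLevelRank t)).foldl
         (fun (acc : Option Int) r =>
           match acc with
           | none => some r
           | some m => if r > m then some r else some m)
         lvl) := by
  induction tokens with
  | nil => intro core lvl; simp
  | cons t ts ih =>
    intro core lvl
    cases h : PySem.Dict.get? pvLevelRank t with
    | none =>
      simp only [List.foldl_cons, List.filter_cons, List.filterMap_cons, h]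
      simpa using ih (core ++ [t]) lvl
    | some rank =>
      cases lvl with
      | none =>
        simp only [List.foldl_cons, List.filter_cons, List.filterMap_cons, h]
        simpa using ih core (some rank)
      | some l =>
        simp only [List.foldl_cons, List.filter_cons, List.filterMap_cons, h]
        by_cases hr : rank > l
        · simp only [if_pos hr]
          simpa using ih core (some rank)
        · simp only [if_neg hr]
          simpa using ih core (some l)

/-- A's option-valued running-max step folded from `none` is `List.max?`. -/
lemma optFold_eq_max? (xs : List Int) :
    xs.foldl
      (fun (acc : Option Int) r =>
        match acc with
        | none => some r
        | some m => if r > m then some r else some m)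
      none
    = xs.max? := by
  cases xs with
  | nil => rfl
  | cons x xs =>
    simp only [List.foldl_cons, List.max?_cons']
    have step : ∀ (ys : List Int) (a : Int),
        ys.foldl
          (fun (acc : Option Int) r =>
            match acc with
            | none => some r
            | some m => if r > m then some r else some m)
          (some a)
        = some (ys.foldl max a) := by
      intro ys
      induction ys with
      | nil => intro a; rfl
      | cons y ys ih =>
        intro a
        simp only [List.foldl_cons]
        have hstep : (if y > a then some y else some a) = some (max a y) := by
          split_ifs with h <;> simp [max_def] <;> omega
        rw [hstep]
        exact ih (max a y)
    exact step xs x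

/-- `max?` only depends on the set of members. -/
lemma max?_congr_mem (xs ys : List Int) (h : ∀ x, x ∈ xs ↔ x ∈ ys) :
    xs.max? = ys.max? := by
  cases hxs : xs.max? with
  | none =>
    rw [List.max?_eq_none_iff] at hxs
    subst hxs
    cases hys : ys.max? with
    | none => rfl
    | some m =>
      have := (List.max?_eq_some_iff.mp hys).1
      exact absurd ((h m).mpr this) (List.not_mem_nil)
  | some m =>
    obtain ⟨hm, hle⟩ := List.max?_eq_some_iff.mp hxs
    symm
    rw [List.max?_eq_some_iff]
    exact ⟨(h m).mp hm, fun y hy => hle y ((h y).mpr hy)⟩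

/-- The two rank lists (ranks of tokens via lookups; table entries present in the token set)
    have the same members. -/
lemma ranks_same_members (tokens : List String) (x : Int) :
    x ∈ tokens.filterMap (fun t => PySem.Dict.get? pvLevelRank t) ↔
    x ∈ pvLevelRank.items.filterMap
        (fun p => if PySem.Set.contains (PySem.Set.ofList tokens) p.1 then some p.2 else none) := by
  have hnd : pvLevelRank.keys.Nodup := by decide
  simp only [List.mem_filterMap]
  constructor
  · rintro ⟨t, ht, hget⟩
    exact ⟨(t, x), PySem.Dict.mem_items_of_get?_eq_some _ hget, by simp [ht]⟩
  · rintro ⟨p, hp, hif⟩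
    simp at hif
    obtain ⟨hmem, hx⟩ := hif
    exact ⟨p.1, hmem, hx ▸ PySem.Dict.get?_of_mem_items _ hp hnd⟩

-- ===== VERDICT (by name: the statement is the Claim_ definition above) =====
theorem split_level_tokens_py_spec : Claim_equal_split_level_tokens_py := by
  intro tokens _
  unfold Spec_split_level_tokens_py split_level_tokens_py split_level_tokens_py_alt
  rw [splitFold_eq tokens [] none, optFold_eq_max?]
  refine Prod.ext ?_ ?_
  · simp only [List.nil_append]
    apply List.filter_congr
    intro t _
    rw [PySem.Dict.contains_eq_isSome_get?]
    cases PySem.Dict.get? pvLevelRank t <;> rfl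
  · exact max?_congr_mem _ _ (ranks_same_members tokens)
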